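-- pv_equiv track=rewrite | github.com/ChristianLanoe/CS3201-Final-1 | Code/recombination.py | OrderCrossover_fill
-- ===== SOURCE A (Python) =====
-- def OrderCrossover_fill(offspringPath, parentPath, locs, seg_end):
--     p = seg_end + 1
--     c = seg_end + 1
--     while(-1 in offspringPath):
--         if(parentPath[p] not in offspringPath):
--             offspringPath[c] = parentPath[p]
--             locs[parentPath[p]] = c
--             c += 1
--             if(c == len(offspringPath)):
--                 c = 0
--         else:
--             p += 1
--             if(p == len(parentPath)):
--                 p = 0
--     return offspringPath
-- ===== SOURCE B (Python) =====
-- def OrderCrossover_fill(offspringPath, parentPath, locs, seg_end):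
--     n = len(offspringPath)
--     start = seg_end + 1
--     # wrap-around parent order starting right after the segment
--     rotation = parentPath[start:] + parentPath[:start]
--     # empty offspring slots, in the same wrap-around order
--     wrap_order = [(start + j) % n for j in range(n)]
--     empties = [i for i in wrap_order if offspringPath[i] == -1]
--     # values already placed in the offspring
--     present = set(v for v in offspringPath if v != -1)
--     e = 0
--     for v in rotation:
--         if e == len(empties):
--             break
--         if v not in present:
--             i = empties[e]
--             offspringPath[i] = v
--             locs[v] = i
--             present.add(v)
--             e += 1
--     return offspringPath
-- ===== Notes on version B (the rewrite author's own statement) =====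
-- stated objective: alternative
-- what changed: A interleaves two wrapping pointers, rescanning the offspring list for -1 and for value membership on every iteration; B precomputes the wrap-around parent order and the wrap-ordered empty slots once, then does a single pass over the rotated parent values with a 'present' set, pairing each new value with the next empty slot.
-- outside the precondition, e.g. on OrderCrossover_fill([2, -1], [1, 0], [7, -1], -1): A returns [1, 0], B returns [2, 1]
import Mathlib
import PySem

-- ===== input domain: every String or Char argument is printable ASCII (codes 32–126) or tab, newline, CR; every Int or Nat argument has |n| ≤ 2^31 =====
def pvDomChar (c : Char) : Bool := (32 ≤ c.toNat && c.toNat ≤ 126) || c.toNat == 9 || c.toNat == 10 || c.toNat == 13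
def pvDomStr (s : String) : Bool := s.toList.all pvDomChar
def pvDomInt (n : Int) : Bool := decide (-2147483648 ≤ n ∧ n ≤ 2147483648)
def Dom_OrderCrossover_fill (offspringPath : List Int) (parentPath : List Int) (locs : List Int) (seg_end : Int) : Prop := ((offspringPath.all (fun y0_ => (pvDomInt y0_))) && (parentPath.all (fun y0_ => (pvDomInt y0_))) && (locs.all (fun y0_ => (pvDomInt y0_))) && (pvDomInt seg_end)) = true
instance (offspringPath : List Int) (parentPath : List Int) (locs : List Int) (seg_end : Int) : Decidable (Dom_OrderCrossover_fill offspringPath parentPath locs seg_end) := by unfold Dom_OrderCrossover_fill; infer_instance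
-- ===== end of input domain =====

-- B fills the empty (-1) offspring slots by first computing the wrap-around parent order and
-- the wrap-ordered empty positions, then one pass with a 'present' set — instead of A's
-- interleaved two-pointer loop with repeated list-membership scans.  Objective: alternative
-- decomposition.  Both A and B mutate offspringPath and locs in place in Python (same writes
-- on Pre_); the equivalence proved here is about the returned list.

-- ===== PORT A =====
-- while-loop of A: fuel-based recursion; Option threads Python's IndexError (none);
-- under Pre_ the fuel n + m + 1 is proved sufficient and no error occurs.
def pvAloop (parent : List Int) : Nat → List Int → List Int → Int → Int → Option (List Int × List Int)
  | 0, _, _, _, _ => none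
  | fuel+1, o, l, p, c =>
    if (-1 : Int) ∈ o then
      match PySem.List.pyGet? parent p with
      | none => none
      | some v =>
        if v ∉ o then
          match PySem.List.pySet? o c v with
          | none => none
          | some o' =>
            match PySem.List.pySet? l v c with
            | none => none
            | some l' =>
              let c' := c + 1
              pvAloop parent fuel o' l' p (if c' = (o'.length : Int) then 0 else c')
        else
          let p' := p + 1
          pvAloop parent fuel o l (if p' = (parent.length : Int) then 0 else p') c
    else some (o, l)

def OrderCrossover_fill (offspringPath : List Int) (parentPath : List Int) (locs : List Int) (seg_end : Int) : List Int :=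
  ((pvAloop parentPath (offspringPath.length + parentPath.length + 1) offspringPath locs (seg_end + 1) (seg_end + 1)).map Prod.fst).getD []

-- ===== PORT B =====
-- loop of B over the rotated parent values; e indexes into the precomputed empties list.
def pvBloop (empties : List Int) : List Int → List Int → List Int → Nat → PySem.Set Int → Option (List Int × List Int)
  | [], o, l, _, _ => some (o, l)
  | v :: R, o, l, e, present =>
    if e = empties.length then some (o, l)
    else if PySem.Set.contains present v then pvBloop empties R o l e present
    else
      let i := PySem.List.pyGetD empties (e : Int) 0
      match PySem.List.pySet? o i v with
      | none => none
      | some o' =>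
        match PySem.List.pySet? l v i with
        | none => none
        | some l' => pvBloop empties R o' l' (e + 1) (PySem.Set.add present v)

def OrderCrossover_fill_alt (offspringPath : List Int) (parentPath : List Int) (locs : List Int) (seg_end : Int) : List Int :=
  let n := offspringPath.length
  let start := seg_end + 1
  let rotation := PySem.List.slice parentPath (some start) none ++ PySem.List.slice parentPath none (some start)
  let wrap_order := (PySem.List.pyRange 0 (n : Int) 1).map (fun j => PySem.Int.mod (start + j) (n : Int))
  let empties := wrap_order.filter (fun i => PySem.List.pyGetD offspringPath i 0 == -1)
  let present := PySem.Set.ofList (offspringPath.filter (fun v => v ≠ -1))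
  ((pvBloop empties rotation offspringPath locs 0 present).map Prod.fst).getD []

-- ===== PRECONDITION & SPEC =====
-- Pre_ restricts to order crossover's natural domain: either the offspring is already complete
-- (no -1 slot), or the two paths have equal positive length, the slots still to fill are exactly
-- the wrap-around block starting right after seg_end, the parent is duplicate-free with values
-- indexable into locs, and the already-placed offspring values are distinct parent values.
-- Outside this domain A may diverge, raise IndexError, or overwrite already-placed entries.
def Pre_OrderCrossover_fill (offspringPath : List Int) (parentPath : List Int) (locs : List Int) (seg_end : Int) : Prop :=
  (-1 : Int) ∉ offspringPath ∨
  (offspringPath.length = parentPath.length ∧ 0 < offspringPath.length ∧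
   0 ≤ seg_end + 1 ∧ seg_end + 1 < (offspringPath.length : Int) ∧
   parentPath.Nodup ∧ (-1 : Int) ∉ parentPath ∧
   (∀ v ∈ parentPath, 0 ≤ v ∧ v < (locs.length : Int)) ∧
   (∀ j < offspringPath.count (-1),
      offspringPath.getD (((seg_end + 1).toNat + j) % offspringPath.length) 0 = -1) ∧
   (offspringPath.filter (fun v => v ≠ -1)).Nodup ∧
   (∀ v ∈ offspringPath, v ≠ -1 → v ∈ parentPath))

instance (offspringPath : List Int) (parentPath : List Int) (locs : List Int) (seg_end : Int) : Decidable (Pre_OrderCrossover_fill offspringPath parentPath locs seg_end) := by unfold Pre_OrderCrossover_fill; infer_instance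

def pvWitness_OrderCrossover_fill : List Int × List Int × List Int × Int := ([2, -1], [2, 1], [0, 0, 0], 0)

def Spec_OrderCrossover_fill (offspringPath : List Int) (parentPath : List Int) (locs : List Int) (seg_end : Int) (out : List Int) : Prop := out = OrderCrossover_fill_alt offspringPath parentPath locs seg_end
instance (offspringPath : List Int) (parentPath : List Int) (locs : List Int) (seg_end : Int) (out : List Int) : Decidable (Spec_OrderCrossover_fill offspringPath parentPath locs seg_end out) := by unfold Spec_OrderCrossover_fill; infer_instance

-- ===== CLAIM (what is proved, stated in full; the proofs are below) =====
def Claim_equal_OrderCrossover_fill : Prop := ∀ (offspringPath : List Int) (parentPath : List Int) (locs : List Int) (seg_end : Int), Dom_OrderCrossover_fill offspringPath parentPath locs seg_end → Pre_OrderCrossover_fill offspringPath parentPath locs seg_end → Spec_OrderCrossover_fill offspringPath parentPath locs seg_end (OrderCrossover_fill offspringPath parentPath locs seg_end)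

-- ===== LEMMAS AND PROOFS =====

-- B's loop is done once e has reached the end of empties.
theorem pvBloop_done (empties : List Int) (R o l : List Int) (present : PySem.Set Int) :
    pvBloop empties R o l empties.length present = some (o, l) := by
  cases R <;> simp [pvBloop]

-- A's index-wrap step, as Nat modular arithmetic.
theorem pvWrapStep (a n : Nat) (h : a < n) :
    (if ((a : Int) + 1) = (n : Int) then (0 : Int) else (a : Int) + 1) = (((a + 1) % n : Nat) : Int) := by
  by_cases hc : a + 1 = n
  · subst hc; simp
  · have h1 : a + 1 < n := by omega
    rw [Nat.mod_eq_of_lt h1]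
    have : ((a : Int) + 1) ≠ (n : Int) := by exact_mod_cast hc
    simp [this]

-- element of the rotation, as a wrap-indexed element of the original list
theorem pvRotGetD (xs : List Int) (s t : Nat) (hs : s ≤ xs.length) (ht : t < xs.length) :
    (xs.drop s ++ xs.take s).getD t 0 = xs.getD ((s + t) % xs.length) 0 := by
  by_cases hlt : s + t < xs.length
  · rw [Nat.mod_eq_of_lt hlt]
    rw [List.getD_append _ _ _ _ (by simp; omega)]
    simp [List.getD_eq_getElem?_getD, List.getElem?_drop]
  · have hmod : (s + t) % xs.length = s + t - xs.length := by
      rw [Nat.mod_eq_sub_mod (by omega)]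
      exact Nat.mod_eq_of_lt (by omega)
    rw [hmod]
    rw [List.getD_append_right _ _ _ _ (by simp; omega)]
    have hidx : t - (xs.drop s).length = s + t - xs.length := by simp; omega
    rw [hidx]
    rw [List.getD_eq_getElem?_getD, List.getElem?_take_of_lt (by omega),
      ← List.getD_eq_getElem?_getD]

-- the values of xs read along the wrap order starting at s are the rotation of xs by s
theorem pvWrapMap (xs : List Int) (s : Nat) (hs : s ≤ xs.length) :
    (List.range xs.length).map (fun j => xs.getD ((s + j) % xs.length) 0) = xs.drop s ++ xs.take s := by
  apply List.ext_getElem (by simp; omega)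
  intro i h1 h2
  simp only [List.getElem_map, List.getElem_range]
  have h2' : i < xs.length := by simpa using h1
  have := pvRotGetD xs s i hs h2'
  rw [List.getD_eq_getElem _ _ h2] at this
  exact this.symm

theorem pvSetDecomp (o : List Int) (c : Nat) (hc : c < o.length) (v : Int) :
    o = o.take c ++ o.getD c 0 :: o.drop (c + 1) ∧
    o.set c v = o.take c ++ v :: o.drop (c + 1) := by
  constructor
  · conv_lhs => rw [← List.take_append_drop c o]
    rw [List.getD_eq_getElem _ _ hc]
    congr 1
    exact (List.getElem_cons_drop hc).symm
  · rw [List.set_eq_take_append_cons_drop, if_pos hc]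

-- A member x of a set-valued list update (o.set c v with o[c] = -1): for x ≠ -1,
-- membership in the updated list is "x = v or x was there already".
theorem pvMemSet (o : List Int) (c : Nat) (hc : c < o.length) (v : Int)
    (hoc : o.getD c 0 = -1) (x : Int) (hx : x ≠ -1) :
    x ∈ o.set c v ↔ x = v ∨ x ∈ o := by
  obtain ⟨hd, hd'⟩ := pvSetDecomp o c hc v
  rw [hoc] at hd
  rw [hd']
  conv_rhs => rw [hd]
  simp only [List.mem_append, List.mem_cons]
  constructor
  · rintro (h | h | h) <;> tauto
  · rintro (h | h | h | h) <;> tauto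

-- splitting a list's length by a predicate
theorem pvFilterSplit (p : Int → Bool) (l : List Int) :
    (l.filter p).length + (l.filter (fun v => !(p v))).length = l.length := by
  induction l with
  | nil => simp
  | cons a l ih =>
    simp only [List.filter_cons]
    by_cases h : p a = true
    · simp [h]; omega
    · simp only [Bool.not_eq_true] at h
      simp [h]; omega

theorem pvFilterNeCount (o : List Int) :
    (o.filter (fun v => decide (v ≠ -1))).length + o.count (-1) = o.length := by
  induction o with
  | nil => simp
  | cons a l ih =>
    simp only [List.filter_cons, List.count_cons]
    by_cases h : a = -1
    · simp [h] at ih ⊢; omega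
    · simp [h] at ih ⊢; omega

-- main loop-alignment lemma: A's two-pointer loop equals B's single pass
theorem pvLoopEq (parent : List Int) (s n L : Nat) (hn : parent.length = n) (hs : s < n)
    (hnodup : parent.Nodup) (hneg : (-1 : Int) ∉ parent)
    (hvals : ∀ v ∈ parent, 0 ≤ v ∧ v < (L : Int)) (empties : List Int) :
    ∀ fuel t e eb c (o l : List Int) (present : PySem.Set Int),
    o.length = n → l.length = L → t ≤ n →
    o.count (-1) = e → c < n →
    (∀ j < e, o.getD ((c + j) % n) 0 = -1) →
    empties.length = eb + e →
    empties.drop eb = (List.range e).map (fun j => (((c + j) % n : Nat) : Int)) →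
    (∀ x : Int, PySem.Set.contains present x = true ↔ (x ∈ o ∧ x ≠ -1)) →
    e ≤ (((parent.drop s ++ parent.take s).drop t).filter (fun v => decide (v ∉ o))).length →
    n - t + e + 1 ≤ fuel →
    pvAloop parent fuel o l (((s + t) % n : Nat) : Int) ((c : Nat) : Int)
      = pvBloop empties ((parent.drop s ++ parent.take s).drop t) o l eb present := by
  have hrotlen : (parent.drop s ++ parent.take s).length = n := by simp; omega
  have hrotperm : (parent.drop s ++ parent.take s).Perm parent := by
    refine (List.perm_append_comm).trans ?_
    rw [List.take_append_drop]
  have hrotnodup : (parent.drop s ++ parent.take s).Nodup := hrotperm.nodup_iff.mpr hnodup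
  have npos : 0 < n := by omega
  intro fuel
  induction fuel using Nat.strong_induction_on with
  | _ fuel IH =>
    intro t e eb c o l present ho hl ht hcount hc hemp hlen hdrop hpres hmiss hfuel
    match e, hcount, hemp, hlen, hdrop, hmiss with
    | 0, hcount, hemp, hlen, hdrop, hmiss =>
      have hno : (-1 : Int) ∉ o := by
        intro hm
        have := List.count_pos_iff.mpr hm
        omega
      obtain ⟨f, rfl⟩ : ∃ f, fuel = f + 1 := ⟨fuel - 1, by omega⟩
      rw [show eb = empties.length from by omega, pvBloop_done]
      simp [pvAloop, hno]
    | e' + 1, hcount, hemp, hlen, hdrop, hmiss =>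
      have hmemneg : (-1 : Int) ∈ o := List.count_pos_iff.mp (by omega)
      have hRne : (parent.drop s ++ parent.take s).drop t ≠ [] := by
        intro h
        rw [h] at hmiss
        simp at hmiss
      have htlt : t < n := by
        by_contra h
        exact hRne (List.drop_eq_nil_of_le (by omega))
      have htrot : t < (parent.drop s ++ parent.take s).length := by omega
      have hdropR : (parent.drop s ++ parent.take s).drop t
          = (parent.drop s ++ parent.take s)[t] :: (parent.drop s ++ parent.take s).drop (t + 1) :=
        (List.getElem_cons_drop htrot).symm
      set v := (parent.drop s ++ parent.take s)[t] with hv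
      have hvrot : v ∈ (parent.drop s ++ parent.take s) := List.getElem_mem htrot
      have hvparent : v ∈ parent := hrotperm.mem_iff.mp hvrot
      have hvne : v ≠ -1 := fun h => hneg (h ▸ hvparent)
      have hmodlt : (s + t) % n < n := Nat.mod_lt _ npos
      have hvget : v = parent.getD ((s + t) % n) 0 := by
        have h1 := pvRotGetD parent s t (by omega) (by omega)
        rw [List.getD_eq_getElem _ _ htrot] at h1
        rw [hn] at h1
        exact h1
      have hpget : PySem.List.pyGet? parent (((s + t) % n : Nat) : Int) = some v := by
        rw [PySem.List.pyGet?_natCast]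
        rw [List.getElem?_eq_getElem (by omega)]
        rw [hvget, List.getD_eq_getElem _ _ (by omega)]
      obtain ⟨f, rfl⟩ : ∃ f, fuel = f + 1 := ⟨fuel - 1, by omega⟩
      have hebne : ¬ (eb = empties.length) := by omega
      rw [hdropR]
      by_cases hvo : v ∈ o
      · -- advance step on both sides
        have hcont : PySem.Set.contains present v = true := (hpres v).mpr ⟨hvo, hvne⟩
        have hwrap := pvWrapStep ((s + t) % n) n hmodlt
        simp only [pvAloop, if_pos hmemneg, hpget, if_neg (not_not_intro hvo), hn, hwrap]
        simp only [pvBloop, if_neg hebne, hcont, if_true]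
        rw [show ((s + t) % n + 1) % n = (s + (t + 1)) % n from by
          rw [Nat.mod_add_mod, Nat.add_assoc]]
        refine IH f (by omega) (t + 1) (e' + 1) eb c o l present ho hl (by omega) hcount hc hemp hlen hdrop hpres ?_ (by omega)
        have : ((parent.drop s ++ parent.take s).drop t).filter (fun w => decide (w ∉ o))
            = ((parent.drop s ++ parent.take s).drop (t + 1)).filter (fun w => decide (w ∉ o)) := by
          rw [hdropR, List.filter_cons]
          simp [hvo]
        rw [this] at hmiss
        exact hmiss
      · -- fill step
        have hcont : PySem.Set.contains present v = false := by
          cases hcb : PySem.Set.contains present v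
          · rfl
          · exact absurd ((hpres v).mp hcb).1 hvo
        have hoc : o.getD c 0 = -1 := by
          have h0 := hemp 0 (by omega)
          rwa [Nat.add_zero, Nat.mod_eq_of_lt hc] at h0
        have hset1 : PySem.List.pySet? o ((c : Nat) : Int) v = some (o.set c v) :=
          PySem.List.pySet?_natCast o c v (by omega)
        have hv0 := hvals v hvparent
        have hvnat : v = ((v.toNat : Nat) : Int) := by omega
        have hset2 : PySem.List.pySet? l v ((c : Nat) : Int) = some (l.set v.toNat ((c : Nat) : Int)) := by
          have h2 := PySem.List.pySet?_natCast l v.toNat ((c : Nat) : Int) (by omega)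
          rwa [← hvnat] at h2
        have hi : PySem.List.pyGetD empties ((eb : Nat) : Int) 0 = ((c : Nat) : Int) := by
          rw [PySem.List.pyGetD_natCast]
          have h1 : empties.getD eb 0 = (empties.drop eb).getD 0 0 := by
            simp [List.getD_eq_getElem?_getD, List.getElem?_drop]
          rw [h1, hdrop, List.range_succ_eq_map]
          simp only [List.map_cons, List.getD_cons_zero, Nat.add_zero, Nat.mod_eq_of_lt hc]
        obtain ⟨hdecomp, hdecomp'⟩ := pvSetDecomp o c (by omega) v
        have hcount' : (o.set c v).count (-1) = e' := by
          have h1 : (o.take c ++ o.getD c 0 :: o.drop (c + 1)).count (-1) = e' + 1 := by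
            rw [← hdecomp]; exact hcount
          rw [hoc] at h1
          rw [hdecomp']
          simp only [List.count_append, List.count_cons] at h1 ⊢
          have : ¬ (v = -1) := hvne
          simp [this] at h1 ⊢
          omega
        have hmem' : ∀ x : Int, x ≠ -1 → (x ∈ o.set c v ↔ x = v ∨ x ∈ o) :=
          fun x hx => pvMemSet o c (by omega) v hoc x hx
        have hsetlen : (o.set c v).length = n := by simp [ho]
        have hecount : e' + 1 ≤ n := by
          have := List.count_le_length (l := o) (a := (-1 : Int))
          omega
        have hemp' : ∀ j < e', (o.set c v).getD (((c + 1) % n + j) % n) 0 = -1 := by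
          intro j hj
          rw [Nat.mod_add_mod]
          have hje := hemp (1 + j) (by omega)
          have hne : (c + 1 + j) % n ≠ c := by
            intro hEq
            rcases Nat.lt_or_ge (c + 1 + j) n with h | h
            · rw [Nat.mod_eq_of_lt h] at hEq; omega
            · have h2 : (c + 1 + j) % n = c + 1 + j - n := by
                rw [Nat.mod_eq_sub_mod h]
                exact Nat.mod_eq_of_lt (by omega)
              omega
          have hidx : (c + 1 + j) % n < n := Nat.mod_lt _ npos
          rw [List.getD_eq_getElem?_getD, List.getElem?_set_ne (show c ≠ (c + 1 + j) % n from fun h => hne h.symm)]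
          rw [← List.getD_eq_getElem?_getD]
          rw [show c + 1 + j = c + (1 + j) from by omega]
          exact hje
        have hdrop' : empties.drop (eb + 1)
            = (List.range e').map (fun j => ((((c + 1) % n + j) % n : Nat) : Int)) := by
          rw [← List.tail_drop, hdrop, List.range_succ_eq_map]
          simp only [List.map_cons, List.tail_cons, List.map_map]
          refine List.map_congr_left ?_
          intro j _
          simp only [Function.comp_apply]
          rw [Nat.mod_add_mod]
          congr 2
          omega
        have hpres' : ∀ x : Int, PySem.Set.contains (PySem.Set.add present v) x = true
            ↔ (x ∈ o.set c v ∧ x ≠ -1) := by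
          intro x
          rw [PySem.Set.contains_iff, PySem.Set.mem_add]
          have hp := hpres x
          rw [PySem.Set.contains_iff] at hp
          constructor
          · rintro (hxp | rfl)
            · obtain ⟨hxo, hx⟩ := hp.mp hxp
              exact ⟨(hmem' x hx).mpr (Or.inr hxo), hx⟩
            · exact ⟨(hmem' v hvne).mpr (Or.inl rfl), hvne⟩
          · rintro ⟨hxo', hx⟩
            rcases (hmem' x hx).mp hxo' with rfl | hxo
            · exact Or.inr rfl
            · exact Or.inl (hp.mpr ⟨hxo, hx⟩)
        have hvnotin : v ∉ (parent.drop s ++ parent.take s).drop (t + 1) := by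
          have hnd : ((parent.drop s ++ parent.take s).drop t).Nodup :=
            hrotnodup.sublist (List.drop_sublist _ _)
          rw [hdropR] at hnd
          exact (List.nodup_cons.mp hnd).1
        have hmiss' : e' ≤ (((parent.drop s ++ parent.take s).drop (t + 1)).filter
            (fun w => decide (w ∉ o.set c v))).length := by
          have heq : ((parent.drop s ++ parent.take s).drop (t + 1)).filter (fun w => decide (w ∉ o.set c v))
              = ((parent.drop s ++ parent.take s).drop (t + 1)).filter (fun w => decide (w ∉ o)) := by
            refine List.filter_congr ?_
            intro x hx
            have hxv : x ≠ v := fun h => hvnotin (h ▸ hx)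
            have hxne : x ≠ -1 := fun h =>
              hneg (h ▸ hrotperm.mem_iff.mp (List.mem_of_mem_drop hx))
            simp [hmem' x hxne, hxv]
          have hlenfil : (((parent.drop s ++ parent.take s).drop t).filter (fun w => decide (w ∉ o))).length
              = (((parent.drop s ++ parent.take s).drop (t + 1)).filter (fun w => decide (w ∉ o))).length + 1 := by
            rw [hdropR, List.filter_cons]
            simp [hvo]
          rw [heq]
          omega
        -- unfold one A step and one B step
        simp only [pvAloop, if_pos hmemneg, hpget, if_pos hvo, hset1, hset2, hsetlen]
        simp only [pvBloop, if_neg hebne, hcont, Bool.false_eq_true, if_false, hi, hset1, hset2]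
        rw [show (if ((c : Nat) : Int) + 1 = ((n : Nat) : Int) then (0 : Int) else ((c : Nat) : Int) + 1)
              = (((c + 1) % n : Nat) : Int) from pvWrapStep c n hc]
        rcases Nat.eq_zero_or_pos e' with rfl | he'
        · -- last fill: both sides are done
          rw [show eb + 1 = empties.length from by omega, pvBloop_done]
          have hno' : (-1 : Int) ∉ o.set c v := by
            intro hm
            have := List.count_pos_iff.mpr hm
            omega
          obtain ⟨f', rfl⟩ : ∃ f', f = f' + 1 := ⟨f - 1, by omega⟩
          simp [pvAloop, hno']
        · -- A advances over v (now present), then both loops continue aligned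
          obtain ⟨f', rfl⟩ : ∃ f', f = f' + 1 := ⟨f - 1, by omega⟩
          have hmo' : (-1 : Int) ∈ o.set c v := List.count_pos_iff.mp (by omega)
          have hvo' : v ∈ o.set c v := (hmem' v hvne).mpr (Or.inl rfl)
          have hwrap := pvWrapStep ((s + t) % n) n hmodlt
          simp only [pvAloop, if_pos hmo', hpget, if_neg (not_not_intro hvo'), hn, hwrap]
          rw [show ((s + t) % n + 1) % n = (s + (t + 1)) % n from by
            rw [Nat.mod_add_mod, Nat.add_assoc]]
          exact IH f' (by omega) (t + 1) e' (eb + 1) ((c + 1) % n) (o.set c v)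
            (l.set v.toNat ((c : Nat) : Int)) (PySem.Set.add present v)
            hsetlen (by simp [hl]) (by omega) hcount' (Nat.mod_lt _ npos) hemp'
            (by omega) hdrop' hpres' hmiss' (by omega)

theorem OrderCrossover_fill_spec : Claim_equal_OrderCrossover_fill := by
  intro o parent l se _hdom hpre
  unfold Spec_OrderCrossover_fill OrderCrossover_fill OrderCrossover_fill_alt
  dsimp only
  rcases hpre with hno | ⟨hlen, hpos, hse0, hseN, hnodup, hnegp, hvals, hemp0, hofnd, hosub⟩
  · -- offspring already complete: both loops exit at once
    have hemt : ((PySem.List.pyRange 0 (o.length : Int) 1).map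
          (fun j => PySem.Int.mod (se + 1 + j) (o.length : Int))).filter
          (fun i => PySem.List.pyGetD o i 0 == -1) = [] := by
      rw [List.filter_eq_nil_iff]
      intro i hi
      simp only [List.mem_map] at hi
      obtain ⟨j, hj, rfl⟩ := hi
      rw [PySem.List.mem_pyRange_one] at hj
      have hn0 : (0 : Int) < (o.length : Int) := by omega
      have hmem := PySem.List.pyGetD_mem o (i := PySem.Int.mod (se + 1 + j) (o.length : Int)) 0
        (by
          unfold PySem.Raise.InRange
          have h1 := PySem.Int.mod_nonneg (se + 1 + j) hn0
          have h2 := PySem.Int.mod_lt (se + 1 + j) hn0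
          omega)
      simp only [beq_iff_eq]
      exact fun h => hno (h ▸ hmem)
    rw [hemt]
    have hb : ∀ (R : List Int) p, pvBloop ([] : List Int) R o l 0 p = some (o, l) := by
      intro R p; cases R <;> simp [pvBloop]
    rw [hb]
    simp [pvAloop, hno]
  · -- structured order-crossover state
    set s := (se + 1).toNat with hsdef
    set k := o.count (-1) with hkdef
    have hsint : ((s : Nat) : Int) = se + 1 := Int.toNat_of_nonneg hse0
    have hsn : s < o.length := by omega
    have hk : k ≤ o.length := by
      have := List.count_le_length (l := o) (a := (-1 : Int))
      omega
    -- the rotation built by B's slices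
    have hrot1 : PySem.List.slice parent (some (se + 1)) none = parent.drop s :=
      PySem.List.slice_from parent hse0
    have hrot2 : PySem.List.slice parent none (some (se + 1)) = parent.take s :=
      PySem.List.slice_to parent hse0
    -- the wrap order built by B, in Nat form
    have hwrap : (PySem.List.pyRange 0 (o.length : Int) 1).map
          (fun j => PySem.Int.mod (se + 1 + j) (o.length : Int))
        = (List.range o.length).map (fun j => (((s + j) % o.length : Nat) : Int)) := by
      rw [PySem.List.pyRange_one, List.map_map]
      simp only [Int.sub_zero, Int.toNat_natCast]
      refine List.map_congr_left ?_
      intro j _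
      simp only [Function.comp_apply, zero_add]
      rw [PySem.Int.mod_eq_emod_of_pos (by omega)]
      rw [show se + 1 + (j : Int) = ((s + j : Nat) : Int) from by push_cast; omega]
      norm_cast
    -- B's empties list, closed form
    have hempties : ((List.range o.length).map (fun j => (((s + j) % o.length : Nat) : Int))).filter
          (fun i => PySem.List.pyGetD o i 0 == -1)
        = (List.range k).map (fun j => (((s + j) % o.length : Nat) : Int)) := by
      rw [List.filter_map]
      have hpred : ((List.range o.length).filter
            ((fun i => PySem.List.pyGetD o i 0 == -1) ∘ (fun j => (((s + j) % o.length : Nat) : Int))))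
          = (List.range o.length).filter (fun j => o.getD ((s + j) % o.length) 0 == -1) := by
        refine List.filter_congr ?_
        intro j _
        simp only [Function.comp_apply, PySem.List.pyGetD_natCast]
      rw [hpred]
      have hcnt : (List.range o.length).countP (fun j => o.getD ((s + j) % o.length) 0 == -1) = k := by
        have h1 : (List.range o.length).countP (fun j => o.getD ((s + j) % o.length) 0 == -1)
            = ((List.range o.length).map (fun j => o.getD ((s + j) % o.length) 0)).countP
                (fun x => x == -1) := by
          rw [List.countP_map]; rfl
        rw [h1, pvWrapMap o s (by omega)]
        rw [← List.count_eq_countP, List.count_append]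
        conv_rhs => rw [hkdef, ← List.take_append_drop s o, List.count_append]
        omega
      have hdecomp : List.range o.length
          = List.range k ++ (List.range (o.length - k)).map (fun x => k + x) := by
        rw [← List.range_add]
        congr 1
        omega
      rw [hdecomp, List.filter_append]
      have h1 : (List.range k).filter (fun j => o.getD ((s + j) % o.length) 0 == -1)
          = List.range k := by
        rw [List.filter_eq_self]
        intro j hj
        rw [beq_iff_eq]
        exact hemp0 j (by simpa using hj)
      have hz : ((List.range (o.length - k)).map (fun x => k + x)).filter
          (fun j => o.getD ((s + j) % o.length) 0 == -1) = [] := by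
        rw [List.filter_eq_nil_iff]
        refine List.countP_eq_zero.mp ?_
        have h3 := hcnt
        rw [hdecomp, List.countP_append] at h3
        have h4 : (List.range k).countP (fun j => o.getD ((s + j) % o.length) 0 == -1) = k := by
          rw [List.countP_eq_length_filter, h1, List.length_range]
        omega
      rw [h1, hz, List.append_nil]
    -- initial membership invariant for B's present set
    have hpresinit : ∀ x : Int, PySem.Set.contains (PySem.Set.ofList (o.filter (fun v => v ≠ -1))) x = true
        ↔ (x ∈ o ∧ x ≠ -1) := by
      intro x
      rw [PySem.Set.contains_iff, PySem.Set.mem_ofList, List.mem_filter]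
      simp
    -- there are at least k parent values missing from the offspring
    have hperm : (parent.drop s ++ parent.take s).Perm parent :=
      (List.perm_append_comm).trans (by rw [List.take_append_drop])
    have hnd : (parent.drop s ++ parent.take s).Nodup := hperm.nodup_iff.mpr hnodup
    have hmissinit : k ≤ ((parent.drop s ++ parent.take s).filter (fun v => decide (v ∉ o))).length := by
      have hsplit := pvFilterSplit (fun v => decide (v ∈ o)) (parent.drop s ++ parent.take s)
      have hpe : (fun v : Int => !(decide (v ∈ o))) = (fun v : Int => decide (v ∉ o)) := by
        funext v; rw [decide_not]
      rw [hpe] at hsplit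
      have hsub : ∀ x ∈ (parent.drop s ++ parent.take s).filter (fun v => decide (v ∈ o)),
          x ∈ o.filter (fun v => decide (v ≠ -1)) := by
        intro x hx
        rw [List.mem_filter] at hx ⊢
        obtain ⟨hxr, hxo⟩ := hx
        have hxp : x ∈ parent := hperm.mem_iff.mp hxr
        refine ⟨by simpa using hxo, ?_⟩
        simp only [decide_eq_true_eq]
        exact fun h => hnegp (h ▸ hxp)
      have hndf : ((parent.drop s ++ parent.take s).filter (fun v => decide (v ∈ o))).Nodup :=
        hnd.filter _
      have hcard : ((parent.drop s ++ parent.take s).filter (fun v => decide (v ∈ o))).length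
          ≤ (o.filter (fun v => decide (v ≠ -1))).length := by
        calc ((parent.drop s ++ parent.take s).filter (fun v => decide (v ∈ o))).length
            = ((parent.drop s ++ parent.take s).filter (fun v => decide (v ∈ o))).toFinset.card :=
              (List.toFinset_card_of_nodup hndf).symm
          _ ≤ (o.filter (fun v => decide (v ≠ -1))).toFinset.card :=
              Finset.card_le_card (fun x hx => by
                rw [List.mem_toFinset] at hx ⊢
                exact hsub x hx)
          _ ≤ (o.filter (fun v => decide (v ≠ -1))).length := List.toFinset_card_le _
      have hnk := pvFilterNeCount o
      have hrlen : (parent.drop s ++ parent.take s).length = o.length := by simp; omega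
      omega
    -- run the aligned loops
    have hmain := pvLoopEq parent s o.length l.length hlen.symm hsn hnodup hnegp hvals
      ((List.range k).map (fun j => (((s + j) % o.length : Nat) : Int)))
      (o.length + parent.length + 1) 0 k 0 s o l
      (PySem.Set.ofList (o.filter (fun v => v ≠ -1)))
      rfl rfl (by omega) hkdef.symm hsn
      (fun j hj => hemp0 j hj)
      (by simp)
      (by rw [List.drop_zero])
      hpresinit
      (by rw [List.drop_zero]; exact hmissinit)
      (by omega)
    rw [List.drop_zero] at hmain
    rw [show (s + 0) % o.length = s from by rw [Nat.add_zero, Nat.mod_eq_of_lt hsn]] at hmain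
    rw [hrot1, hrot2, hwrap, hempties]
    rw [show (se + 1 : Int) = ((s : Nat) : Int) from hsint.symm]
    rw [hmain]
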